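-- pv_equiv track=rewrite | github.com/muhammad06hassan/cockpit-user-audit | audit_refactor.py | build_user_access_matrix
-- ===== SOURCE A (Python) =====
-- from typing import Any, Dict, List, Optional, Set, Tuple
--
-- def build_user_access_matrix(users: List[Dict], profiles: List[Dict]) -> Tuple[List[str], List[List]]:
--     profile_map = {p.get("_id"): p.get("name", "N/A") for p in profiles if p.get("_id")}
--     header = ["Profile ID", "Profile Name", "User Name", "User Email", "User ID", "Status"]
--     rows = []
--     for u in sorted(users, key=lambda x: ((x.get("profile") or ""), (x.get("name") or ""))):
--         pid = u.get("profile") or "N/A"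
--         pname = profile_map.get(pid, "N/A")
--         rows.append([pid, pname, u.get("name", "N/A"), u.get("email", "N/A"), u.get("_id", "N/A"), map_status(u)])
--     return header, rows
--
-- def map_status(user: Dict) -> str:
--     s = (user.get("status") or "").strip().lower()
--     if s == "enabled" or s == "active":
--         return "Active"
--     if s == "pending":
--         return "Pending Approval"
--     if s == "disabled":
--         return "Inactive"
--     return "Inactive"
-- ===== SOURCE B (Python) =====
-- from typing import Dict, List, Tuple
--
-- _STATUS_TABLE = {"enabled": "Active", "active": "Active", "pending": "Pending Approval"}
--
-- def map_status(user: Dict) -> str: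
--     s = (user.get("status") or "").strip().lower()
--     return _STATUS_TABLE.get(s, "Inactive")
--
-- def build_user_access_matrix(users: List[Dict], profiles: List[Dict]) -> Tuple[List[str], List[List]]:
--     profile_map = {}
--     for p in profiles:
--         pid = p.get("_id")
--         if pid:
--             profile_map[pid] = p.get("name", "N/A")
--     buckets = {}
--     for u in users:
--         buckets.setdefault(u.get("profile") or "", []).append(u)
--     header = ["Profile ID", "Profile Name", "User Name", "User Email", "User ID", "Status"]
--     rows = []
--     for key in sorted(buckets):
--         pid = key if key else "N/A"
--         pname = profile_map.get(pid, "N/A")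
--         rows.extend([[pid, pname, u.get("name", "N/A"), u.get("email", "N/A"),
--                       u.get("_id", "N/A"), map_status(u)]
--                      for u in sorted(buckets[key], key=lambda x: x.get("name") or "")])
--     return header, rows
-- ===== Notes on version B (the rewrite author's own statement) =====
-- stated objective: alternative
-- what changed: A stably sorts the whole user list by a (profile, name) tuple key and projects rows in one flat loop; B first groups users into a dict of per-profile buckets in one input-order pass, then walks the sorted bucket keys and emits each bucket's members sorted by name, hoisting the profile-id/name computation out to once per bucket; the status mapper becomes a table lookup.
import Mathlib
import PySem

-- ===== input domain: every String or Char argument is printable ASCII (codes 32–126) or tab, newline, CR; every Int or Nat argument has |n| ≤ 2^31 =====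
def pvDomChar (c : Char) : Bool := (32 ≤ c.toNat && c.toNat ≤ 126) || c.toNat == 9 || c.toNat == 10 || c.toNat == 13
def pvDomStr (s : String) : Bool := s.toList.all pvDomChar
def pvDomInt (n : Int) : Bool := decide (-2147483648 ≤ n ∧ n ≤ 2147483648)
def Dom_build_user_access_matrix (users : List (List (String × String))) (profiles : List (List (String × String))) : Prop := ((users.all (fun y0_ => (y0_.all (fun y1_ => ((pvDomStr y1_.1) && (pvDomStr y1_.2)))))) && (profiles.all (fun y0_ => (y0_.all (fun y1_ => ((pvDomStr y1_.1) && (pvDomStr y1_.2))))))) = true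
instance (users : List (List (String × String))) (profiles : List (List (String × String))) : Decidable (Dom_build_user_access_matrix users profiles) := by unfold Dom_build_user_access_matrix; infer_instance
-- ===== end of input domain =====

-- B replaces A's flat sort by a (profile, name) tuple key with a group-by-profile dict walked in
-- sorted key order, each bucket sorted by name (objective: alternative decomposition, same cost).

-- ===== PORT A =====
-- helper: Python's `opt or d` for an Optional[str] (None and "" are falsy)
def pvOrStr (o : Option String) (d : String) : String :=
  match o with
  | none => d
  | some s => if s = "" then d else s

def map_status (u : List (String × String)) : String :=
  let s := PySem.Str.lower (PySem.Str.strip (((PySem.Dict.mk u).get? "status").getD ""))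
  if s == "enabled" || s == "active" then "Active"
  else if s == "pending" then "Pending Approval"
  else if s == "disabled" then "Inactive"
  else "Inactive"

def build_user_access_matrix (users : List (List (String × String))) (profiles : List (List (String × String))) : List String × List (List String) :=
  let profile_map : PySem.Dict String String :=
    profiles.foldl (fun m p =>
      match (PySem.Dict.mk p).get? "_id" with
      | none => m
      | some pid => if pid = "" then m else m.insert pid (((PySem.Dict.mk p).get? "name").getD "N/A"))
      PySem.Dict.empty
  let header := ["Profile ID", "Profile Name", "User Name", "User Email", "User ID", "Status"]
  let rows :=
    (PySem.List.sorted2 users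
        (fun x => ((PySem.Dict.mk x).get? "profile").getD "")
        (fun x => ((PySem.Dict.mk x).get? "name").getD "") false).foldl
      (fun rows u =>
        let pid := pvOrStr ((PySem.Dict.mk u).get? "profile") "N/A"
        let pname := profile_map.getD pid "N/A"
        rows ++ [[pid, pname, ((PySem.Dict.mk u).get? "name").getD "N/A",
                  ((PySem.Dict.mk u).get? "email").getD "N/A",
                  ((PySem.Dict.mk u).get? "_id").getD "N/A", map_status u]]) []
  (header, rows)

-- ===== PORT B =====
def map_status_alt (u : List (String × String)) : String :=
  (PySem.Dict.mk [("enabled", "Active"), ("active", "Active"), ("pending", "Pending Approval")]).getD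
    (PySem.Str.lower (PySem.Str.strip (((PySem.Dict.mk u).get? "status").getD ""))) "Inactive"

def build_user_access_matrix_alt (users : List (List (String × String))) (profiles : List (List (String × String))) : List String × List (List String) :=
  let profile_map : PySem.Dict String String :=
    profiles.foldl (fun m p =>
      match (PySem.Dict.mk p).get? "_id" with
      | none => m
      | some pid => if pid ≠ "" then m.insert pid (((PySem.Dict.mk p).get? "name").getD "N/A") else m)
      PySem.Dict.empty
  let buckets : PySem.Dict String (List (List (String × String))) :=
    users.foldl (fun b u =>
      b.modify (((PySem.Dict.mk u).get? "profile").getD "") [] (fun l => l ++ [u]))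
      PySem.Dict.empty
  let header := ["Profile ID", "Profile Name", "User Name", "User Email", "User ID", "Status"]
  let rows :=
    (PySem.List.sorted buckets.keys (fun c => c) false).foldl
      (fun rows c =>
        let pid := if c = "" then "N/A" else c
        let pname := profile_map.getD pid "N/A"
        rows ++ (PySem.List.sorted (buckets.getD c [])
                    (fun u => ((PySem.Dict.mk u).get? "name").getD "") false).map
          (fun u => [pid, pname, ((PySem.Dict.mk u).get? "name").getD "N/A",
                     ((PySem.Dict.mk u).get? "email").getD "N/A",
                     ((PySem.Dict.mk u).get? "_id").getD "N/A", map_status_alt u])) []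
  (header, rows)

-- ===== PRECONDITION & SPEC =====
def Spec_build_user_access_matrix (users : List (List (String × String))) (profiles : List (List (String × String))) (out : List String × List (List String)) : Prop := out = build_user_access_matrix_alt users profiles
instance (users : List (List (String × String))) (profiles : List (List (String × String))) (out : List String × List (List String)) : Decidable (Spec_build_user_access_matrix users profiles out) := by unfold Spec_build_user_access_matrix; infer_instance

-- ===== CLAIM (what is proved, stated in full; the proofs are below) =====
def Claim_equal_build_user_access_matrix : Prop := ∀ (users : List (List (String × String))) (profiles : List (List (String × String))), Dom_build_user_access_matrix users profiles → Spec_build_user_access_matrix users profiles (build_user_access_matrix users profiles)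

-- ===== LEMMAS AND PROOFS =====

-- the tuple-key comparison Python's sorted uses in A
def pvLt2 {α : Type} (k1 k2 : α → String) (a b : α) : Bool :=
  decide (k1 a < k1 b) || (!decide (k1 b < k1 a) && decide (k2 a < k2 b))

def pvK1 (u : List (String × String)) : String := ((PySem.Dict.mk u).get? "profile").getD ""
def pvK2 (u : List (String × String)) : String := ((PySem.Dict.mk u).get? "name").getD ""

theorem pvInsertBy_append_true {α : Type} (f : α → α → Bool) (x : α) (l r : List α)
    (h : ∀ y ∈ r, f x y = true) :
    PySem.List.insertBy f x (l ++ r) = PySem.List.insertBy f x l ++ r := by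
  induction l with
  | nil =>
    cases r with
    | nil => rfl
    | cons y r' => simp [PySem.List.insertBy, h y (by simp)]
  | cons z l' ih =>
    simp only [List.cons_append, PySem.List.insertBy]
    split
    · rfl
    · rw [ih]; simp

theorem pvInsertBy_append_false {α : Type} (f : α → α → Bool) (x : α) (l r : List α)
    (h : ∀ y ∈ l, f x y = false) :
    PySem.List.insertBy f x (l ++ r) = l ++ PySem.List.insertBy f x r := by
  induction l with
  | nil => rfl
  | cons z l' ih =>
    simp only [List.cons_append, PySem.List.insertBy, h z (by simp)]
    rw [ih (fun y hy => h y (by simp [hy]))]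
    simp

theorem pvInsertBy_congr {α : Type} (f g : α → α → Bool) (x : α) (l : List α)
    (h : ∀ y ∈ l, f x y = g x y) :
    PySem.List.insertBy f x l = PySem.List.insertBy g x l := by
  induction l with
  | nil => rfl
  | cons z l' ih =>
    simp only [PySem.List.insertBy, h z (by simp)]
    rw [ih (fun y hy => h y (by simp [hy]))]

theorem pvSorted2_append {α : Type} (k1 k2 : α → String) (xs : List α) (x : α) :
    PySem.List.sorted2 (xs ++ [x]) k1 k2 false =
      PySem.List.insertBy (pvLt2 k1 k2) x (PySem.List.sorted2 xs k1 k2 false) := by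
  have h : ∀ (l : List α), PySem.List.sorted2 l k1 k2 false =
      List.foldl (fun acc y => PySem.List.insertBy (pvLt2 k1 k2) y acc) [] l := fun l => rfl
  rw [h, h, List.foldl_append]
  rfl

theorem pvSorted_append {α κ : Type} [LT κ] [DecidableLT κ] (key : α → κ) (xs : List α) (x : α) :
    PySem.List.sorted (xs ++ [x]) key false =
      PySem.List.insertBy (fun a b => decide (key a < key b)) x (PySem.List.sorted xs key false) := by
  rw [PySem.List.sorted_eq_foldl_insertBy, PySem.List.sorted_eq_foldl_insertBy,
    List.foldl_append]
  rfl

theorem pvOfList_append_singleton {α : Type} [BEq α] (xs : List α) (x : α) :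
    PySem.Set.ofList (xs ++ [x]) = PySem.Set.add (PySem.Set.ofList xs) x := by
  simp [PySem.Set.ofList_eq_foldl, List.foldl_append]

-- inserting one element into a concatenation of key-homogeneous blocks listed in strictly
-- increasing key order: it lands in (or creates) the block of its own k1-key
theorem pvInsertFlat {α : Type} (k1 k2 : α → String) (x : α) (ks : List String)
    (B : String → List α)
    (hks : ks.Pairwise (· < ·))
    (hB : ∀ c ∈ ks, ∀ u ∈ B c, k1 u = c)
    (hnew : k1 x ∉ ks → B (k1 x) = []) :
    PySem.List.insertBy (pvLt2 k1 k2) x (ks.flatMap B) =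
      (if k1 x ∈ ks then ks else PySem.List.insertBy (fun a b => decide (a < b)) (k1 x) ks).flatMap
        (fun c => if c = k1 x then PySem.List.insertBy (pvLt2 k1 k2) x (B c) else B c) := by
  induction ks with
  | nil =>
    have hB0 : B (k1 x) = [] := hnew (by simp)
    simp [PySem.List.insertBy, hB0]
  | cons c ks' ih =>
    obtain ⟨hc, hks'⟩ := List.pairwise_cons.mp hks
    rcases lt_trichotomy (k1 x) c with hlt | heq | hgt
    · -- the new key precedes the first block
      have hmem : k1 x ∉ c :: ks' := by
        intro hm
        rcases List.mem_cons.mp hm with h1 | h2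
        · exact absurd h1 (ne_of_lt hlt)
        · exact lt_asymm hlt (hc _ h2)
      have hB0 : B (k1 x) = [] := hnew hmem
      have hall : ∀ y ∈ (c :: ks').flatMap B, pvLt2 k1 k2 x y = true := by
        intro y hy
        obtain ⟨c', hc', hyB⟩ := List.mem_flatMap.mp hy
        have hk : k1 y = c' := hB c' hc' y hyB
        have hlt' : k1 x < c' := by
          rcases List.mem_cons.mp hc' with h1 | h2
          · exact h1 ▸ hlt
          · exact lt_trans hlt (hc _ h2)
        simp [pvLt2, hk, hlt']
      have hstep := pvInsertBy_append_true (pvLt2 k1 k2) x [] ((c :: ks').flatMap B) hall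
      simp only [List.nil_append] at hstep
      rw [hstep, if_neg hmem]
      have hins : PySem.List.insertBy (fun a b : String => decide (a < b)) (k1 x) (c :: ks')
          = k1 x :: c :: ks' := by
        simp [PySem.List.insertBy, hlt]
      rw [hins]
      simp only [List.flatMap_cons]
      rw [if_pos trivial, hB0, if_neg (fun he : c = k1 x => absurd he.symm (ne_of_lt hlt))]
      have hcongr : List.flatMap
          (fun c' => if c' = k1 x then PySem.List.insertBy (pvLt2 k1 k2) x (B c') else B c') ks'
          = List.flatMap B ks' :=
        List.flatMap_congr (fun c' hc' =>
          if_neg (fun he : c' = k1 x => lt_asymm hlt (he ▸ hc _ hc')))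
      rw [hcongr]
    · -- the element joins the block of its own key
      have hmem : k1 x ∈ c :: ks' := List.mem_cons.mpr (Or.inl heq)
      rw [if_pos hmem]
      have hall : ∀ y ∈ ks'.flatMap B, pvLt2 k1 k2 x y = true := by
        intro y hy
        obtain ⟨c', hc', hyB⟩ := List.mem_flatMap.mp hy
        have hk : k1 y = c' := hB c' (List.mem_cons_of_mem _ hc') y hyB
        have hlt' : k1 x < c' := heq ▸ hc _ hc'
        simp [pvLt2, hk, hlt']
      rw [List.flatMap_cons, pvInsertBy_append_true _ _ _ _ hall,
        List.flatMap_cons, if_pos heq.symm]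
      have hcongr : ∀ c' ∈ ks',
          (if c' = k1 x then PySem.List.insertBy (pvLt2 k1 k2) x (B c') else B c') = B c' := by
        intro c' hc'
        exact if_neg (fun he => absurd (heq ▸ hc _ hc') (he ▸ lt_irrefl _))
      rw [List.flatMap_congr hcongr]
    · -- the whole first block precedes the element
      have hne : c ≠ k1 x := ne_of_lt hgt
      have hfalse : ∀ y ∈ B c, pvLt2 k1 k2 x y = false := by
        intro y hy
        have hk : k1 y = c := hB c List.mem_cons_self y hy
        simp [pvLt2, hk, hgt, lt_asymm hgt]
      rw [List.flatMap_cons, pvInsertBy_append_false _ _ _ _ hfalse]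
      have hnotc : k1 x ∉ ks' → k1 x ∉ c :: ks' := by
        intro hnm hmem'
        rcases List.mem_cons.mp hmem' with h1 | h2
        · exact hne h1.symm
        · exact hnm h2
      have ihh := ih hks' (fun c' h u hu => hB c' (List.mem_cons_of_mem _ h) u hu)
        (fun hnm => hnew (hnotc hnm))
      rw [ihh]
      by_cases hm : k1 x ∈ ks'
      · rw [if_pos hm, if_pos (List.mem_cons_of_mem _ hm), List.flatMap_cons,
          if_neg (fun he => hne he)]
      · have hins : PySem.List.insertBy (fun a b : String => decide (a < b)) (k1 x) (c :: ks')
            = c :: PySem.List.insertBy (fun a b : String => decide (a < b)) (k1 x) ks' := by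
          simp [PySem.List.insertBy, lt_asymm hgt]
        rw [if_neg hm, if_neg (hnotc hm), hins, List.flatMap_cons,
          if_neg (fun he => hne he)]

-- A's flat stable sort by the (k1, k2) tuple key, decomposed into k1-buckets each sorted by k2
theorem pvSorted_append_id (xs : List String) (x : String) :
    PySem.List.sorted (xs ++ [x]) (fun c => c) false =
      PySem.List.insertBy (fun a b => decide (a < b)) x
        (PySem.List.sorted xs (fun c => c) false) := by
  rw [pvSorted_append]

theorem pvSorted2Flat {α : Type} (k1 k2 : α → String) (xs : List α) :
    PySem.List.sorted2 xs k1 k2 false =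
      (PySem.List.sorted (PySem.Set.ofList (xs.map k1)) (fun c => c) false).flatMap
        (fun c => PySem.List.sorted (xs.filter (fun u => k1 u == c)) k2 false) := by
  induction xs using List.reverseRecOn with
  | nil => rfl
  | append_singleton xs x ih =>
    rw [pvSorted2_append, ih]
    have hks : (PySem.List.sorted (PySem.Set.ofList (xs.map k1)) (fun c => c) false).Pairwise
        (· < ·) := PySem.List.sorted_ofList_pairwise_lt _
    have hB : ∀ c ∈ PySem.List.sorted (PySem.Set.ofList (xs.map k1)) (fun c => c) false,
        ∀ u ∈ PySem.List.sorted (xs.filter (fun u => k1 u == c)) k2 false, k1 u = c := by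
      intro c _ u hu
      have hu' := (PySem.List.mem_sorted _ _ _ _).mp hu
      simpa using (List.mem_filter.mp hu').2
    have hnew : k1 x ∉ PySem.List.sorted (PySem.Set.ofList (xs.map k1)) (fun c => c) false →
        PySem.List.sorted (xs.filter (fun u => k1 u == k1 x)) k2 false = [] := by
      intro hnm
      have hx : k1 x ∉ xs.map k1 := fun hmm =>
        hnm ((PySem.List.mem_sorted _ _ _ _).mpr ((PySem.Set.mem_ofList _ _).mpr hmm))
      have hf : xs.filter (fun u => k1 u == k1 x) = [] := by
        apply List.filter_eq_nil_iff.mpr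
        intro u hu hbe
        exact hx (List.mem_map.mpr ⟨u, hu, by simpa using hbe⟩)
      rw [hf]
      rfl
    rw [pvInsertFlat k1 k2 x _ _ hks hB hnew]
    have hmap : (xs ++ [x]).map k1 = xs.map k1 ++ [k1 x] := by simp
    rw [hmap, pvOfList_append_singleton]
    have hbucket : ∀ c,
        (if c = k1 x then
            PySem.List.insertBy (pvLt2 k1 k2) x
              (PySem.List.sorted (xs.filter (fun u => k1 u == c)) k2 false)
          else PySem.List.sorted (xs.filter (fun u => k1 u == c)) k2 false)
        = PySem.List.sorted ((xs ++ [x]).filter (fun u => k1 u == c)) k2 false := by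
      intro c
      by_cases hce : c = k1 x
      · rw [if_pos hce]
        have hf : (xs ++ [x]).filter (fun u => k1 u == c) = xs.filter (fun u => k1 u == c) ++ [x] := by
          simp [List.filter_append, hce]
        rw [hf, pvSorted_append]
        apply pvInsertBy_congr
        intro y hy
        have hy' := (PySem.List.mem_sorted _ _ _ _).mp hy
        have hk : k1 y = c := by simpa using (List.mem_filter.mp hy').2
        simp [pvLt2, hk, hce]
      · rw [if_neg hce]
        have hb : (k1 x == c) = false := beq_eq_false_iff_ne.mpr (fun h => hce h.symm)
        have hf : (xs ++ [x]).filter (fun u => k1 u == c) = xs.filter (fun u => k1 u == c) := by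
          simp [List.filter_append, hb]
        rw [hf]
    by_cases hm : k1 x ∈ PySem.List.sorted (PySem.Set.ofList (xs.map k1)) (fun c => c) false
    · have hmS : k1 x ∈ PySem.Set.ofList (xs.map k1) := (PySem.List.mem_sorted _ _ _ _).mp hm
      have hct : PySem.Set.contains (PySem.Set.ofList (xs.map k1)) (k1 x) = true :=
        (PySem.Set.contains_iff _ _).mpr hmS
      have hadd : PySem.Set.add (PySem.Set.ofList (xs.map k1)) (k1 x)
          = PySem.Set.ofList (xs.map k1) := by
        simp only [PySem.Set.add, hct, if_true]
      rw [if_pos hm, hadd]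
      exact List.flatMap_congr (fun c _ => hbucket c)
    · rw [if_neg hm]
      have hadd : PySem.Set.add (PySem.Set.ofList (xs.map k1)) (k1 x)
          = PySem.Set.ofList (xs.map k1) ++ [k1 x] := by
        have hcon : PySem.Set.contains (PySem.Set.ofList (xs.map k1)) (k1 x) = false :=
          Bool.eq_false_iff.mpr (fun h =>
            hm ((PySem.List.mem_sorted _ _ _ _).mpr ((PySem.Set.contains_iff _ _).mp h)))
        simp only [PySem.Set.add, hcon, Bool.false_eq_true, if_false]
      rw [hadd, pvSorted_append_id]
      exact List.flatMap_congr (fun c _ => hbucket c)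

-- the two ports build the same profile-id → profile-name dictionary
theorem pvProfileMap_eq (profiles : List (List (String × String))) :
    profiles.foldl (fun m p =>
        match (PySem.Dict.mk p).get? "_id" with
        | none => m
        | some pid => if pid ≠ "" then m.insert pid (((PySem.Dict.mk p).get? "name").getD "N/A") else m)
      PySem.Dict.empty
    = profiles.foldl (fun m p =>
        match (PySem.Dict.mk p).get? "_id" with
        | none => m
        | some pid => if pid = "" then m else m.insert pid (((PySem.Dict.mk p).get? "name").getD "N/A"))
      PySem.Dict.empty := by
  apply PySem.List.foldl_congr_mem
  intro m p _
  cases (PySem.Dict.mk p).get? "_id" with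
  | none => rfl
  | some pid =>
    by_cases h : pid = ""
    · simp [h]
    · simp [h]

-- the two status mappers agree
theorem pvStatus_eq (u : List (String × String)) : map_status_alt u = map_status u := by
  unfold map_status map_status_alt
  generalize (PySem.Str.lower (PySem.Str.strip (((PySem.Dict.mk u).get? "status").getD ""))) = s
  rw [PySem.Dict.getD_eq_get?_getD]
  by_cases h1 : s = "enabled"
  · subst h1; rfl
  by_cases h2 : s = "active"
  · subst h2; rfl
  by_cases h3 : s = "pending"
  · subst h3; rfl
  have b1 : ("enabled" == s) = false := beq_eq_false_iff_ne.mpr (Ne.symm h1)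
  have b2 : ("active" == s) = false := beq_eq_false_iff_ne.mpr (Ne.symm h2)
  have b3 : ("pending" == s) = false := beq_eq_false_iff_ne.mpr (Ne.symm h3)
  have c1 : (s == "enabled") = false := beq_eq_false_iff_ne.mpr h1
  have c2 : (s == "active") = false := beq_eq_false_iff_ne.mpr h2
  have c3 : (s == "pending") = false := beq_eq_false_iff_ne.mpr h3
  rw [PySem.Dict.get?_mk_cons, b1, PySem.Dict.get?_mk_cons, b2, PySem.Dict.get?_mk_cons, b3]
  simp [c1, c2, c3, PySem.Dict.get?]

-- A's per-user row equals B's per-bucket row on the members of that bucket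
theorem pvRow_eq (c : String) (u : List (String × String))
    (h : ((PySem.Dict.mk u).get? "profile").getD "" = c) :
    pvOrStr ((PySem.Dict.mk u).get? "profile") "N/A" = (if c = "" then "N/A" else c) := by
  cases hg : (PySem.Dict.mk u).get? "profile" with
  | none =>
    rw [hg] at h
    simp only [Option.getD_none] at h
    simp [pvOrStr, ← h]
  | some s =>
    rw [hg] at h
    simp only [Option.getD_some] at h
    subst h
    simp [pvOrStr]

-- ===== VERDICT (by name: the statement is the Claim_ definition above) =====
theorem build_user_access_matrix_spec : Claim_equal_build_user_access_matrix := by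
  intro users profiles _
  unfold Spec_build_user_access_matrix build_user_access_matrix build_user_access_matrix_alt
  rw [pvProfileMap_eq]
  dsimp only
  simp only [Prod.mk.injEq]
  refine ⟨trivial, ?_⟩
  rw [PySem.List.foldl_append_singleton_eq_map, PySem.List.foldl_append_eq_flatMap]
  simp only [List.nil_append]
  have hkeys : (users.foldl (fun b u =>
      b.modify (((PySem.Dict.mk u).get? "profile").getD "") [] (fun l => l ++ [u]))
      PySem.Dict.empty).keys
      = PySem.Set.ofList (users.map (fun u => ((PySem.Dict.mk u).get? "profile").getD "")) := by
    rw [PySem.Dict.keys_foldl_modify_key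
      (key := fun u => ((PySem.Dict.mk u).get? "profile").getD "")
      (d0 := ([] : List (List (String × String)))) (f := fun _ u => fun l => l ++ [u])]
    rw [PySem.Dict.keys_empty, PySem.Set.update_nil_left]
  have hgetd : ∀ c : String, (users.foldl (fun b u =>
      b.modify (((PySem.Dict.mk u).get? "profile").getD "") [] (fun l => l ++ [u]))
      PySem.Dict.empty).getD c []
      = users.filter (fun u => (((PySem.Dict.mk u).get? "profile").getD "") == c) := by
    intro c
    have h1 : users.foldl (fun b u =>
        b.modify (((PySem.Dict.mk u).get? "profile").getD "") [] (fun l => l ++ [u]))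
        PySem.Dict.empty
        = (users.map (fun u => ((((PySem.Dict.mk u).get? "profile").getD ""), u))).foldl
            (fun d p => d.modify p.1 [] (fun l => l ++ [p.2])) PySem.Dict.empty :=
      (List.foldl_map
        (f := fun u => ((((PySem.Dict.mk u).get? "profile").getD ""), u))
        (g := fun d p => d.modify p.1 [] (fun l => l ++ [p.2]))
        (l := users) (init := PySem.Dict.empty)).symm
    rw [h1, PySem.Dict.getD_foldl_modify_append]
    simp [List.filter_map, List.map_map, Function.comp_def]
  simp only [hkeys, hgetd]
  rw [pvSorted2Flat (fun x => ((PySem.Dict.mk x).get? "profile").getD "")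
    (fun x => ((PySem.Dict.mk x).get? "name").getD "") users]
  rw [List.map_flatMap]
  apply List.flatMap_congr
  intro c hc
  apply List.map_congr_left
  intro u hu
  have hk : ((PySem.Dict.mk u).get? "profile").getD "" = c := by
    have hm := (PySem.List.mem_sorted _ _ _ _).mp hu
    simpa using (List.mem_filter.mp hm).2
  simp only [pvRow_eq c u hk, pvStatus_eq]
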